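-- pv_equiv track=rewrite | github.com/frantizek/max-card-count-problem | src/fix_iterative.py | max_card_count
-- ===== SOURCE A (Python) =====
-- from typing import Dict, List
--
-- def max_card_count(n: int, cards: List[int]) -> int:
--     """
--     Compute the maximum number of cards that can be picked up using an iterative
--     dynamic programming approach over achievable non-negative sums.
--
--     Parameters:
--         n (int): Number of cards. Expected to equal len(cards).
--         cards (List[int]): The list of card values to process in order.
--
--     Returns:
--         int: The maximum number of cards that can be taken while maintaining a
--              non-negative running sum at all times.
--     """
--     # dp maps achievable non-negative sums to the best count of cards taken.
--     dp: Dict[int, int] = {0: 0}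
--
--     for c in cards:
--         # Begin with the "skip" option: retain all existing states.
--         new_dp: Dict[int, int] = dict(dp)
--
--         # Consider "take" option for each existing achievable sum.
--         for s, cnt in dp.items():
--             ns = s + c
--             if ns >= 0:
--                 # If we can take this card, update the new mapping with the improved count.
--                 new_cnt = cnt + 1
--                 # Only keep the best count for a given sum.
--                 if ns not in new_dp or new_dp[ns] < new_cnt:
--                     new_dp[ns] = new_cnt
--
--         # Move to the next card with updated states.
--         dp = new_dp
--
--     # If no states exist (shouldn't happen since {0:0} persists), default to 0.
--     return max(dp.values()) if dp else 0
-- ===== SOURCE B (Python) =====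
-- def max_card_count(n, cards):
--     # best[k] = maximum running sum achievable by taking exactly k cards
--     # (in order) while keeping every prefix sum non-negative; answer = len(best)-1.
--     best = [0]
--     for c in cards:
--         new = [0]
--         for k in range(1, len(best)):
--             cand = best[k - 1] + c
--             new.append(max(best[k], cand) if cand >= 0 else best[k])
--         if best[-1] + c >= 0:
--             new.append(best[-1] + c)
--         best = new
--     return len(best) - 1
-- ===== Notes on version B (the rewrite author's own statement) =====
-- stated objective: faster
-- what changed: Replaces the dict-of-reachable-sums DP (state = every achievable non-negative sum, value = best count) with the dominance-based dual DP keeping one number per count: a list best where best[k] is the maximum achievable sum using exactly k cards, so the state space is O(n) instead of the set of all reachable sums.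
import Mathlib
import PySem

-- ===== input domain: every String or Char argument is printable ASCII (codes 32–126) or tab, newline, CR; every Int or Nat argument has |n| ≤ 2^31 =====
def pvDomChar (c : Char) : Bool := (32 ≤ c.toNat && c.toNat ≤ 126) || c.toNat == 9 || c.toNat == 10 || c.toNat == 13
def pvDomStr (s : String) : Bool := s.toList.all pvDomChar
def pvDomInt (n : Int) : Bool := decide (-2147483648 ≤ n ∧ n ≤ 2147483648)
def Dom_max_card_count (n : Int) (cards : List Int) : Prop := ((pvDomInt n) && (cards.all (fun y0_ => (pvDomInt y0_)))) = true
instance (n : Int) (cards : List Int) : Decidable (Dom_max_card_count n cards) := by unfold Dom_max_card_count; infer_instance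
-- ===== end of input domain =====

-- B replaces A's dict-over-reachable-sums DP by the dual dominance DP keeping, per card
-- count k, only the maximum achievable sum (objective: faster — O(n) states per step
-- instead of the whole set of reachable sums). Return values are proved equal on Dom.

-- ===== PORT A =====
-- inner loop body: "for s, cnt in dp.items(): ..."
def pvInnerA (c : Int) (nd : PySem.Dict Int Int) (sc : Int × Int) : PySem.Dict Int Int :=
  let ns := sc.1 + c
  if 0 ≤ ns then
    let new_cnt := sc.2 + 1
    match nd.get? ns with
    | none => nd.insert ns new_cnt
    | some v => if v < new_cnt then nd.insert ns new_cnt else nd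
  else nd

-- one card step: new_dp = dict(dp); inner loop over dp.items(); dp = new_dp
def pvStepA (c : Int) (dp : PySem.Dict Int Int) : PySem.Dict Int Int :=
  dp.items.foldl (pvInnerA c) dp

def max_card_count (n : Int) (cards : List Int) : Int :=
  let dp := cards.foldl (fun dp c => pvStepA c dp) (PySem.Dict.ofList [((0:Int),(0:Int))])
  -- return max(dp.values()) if dp else 0
  match PySem.List.max? dp.values (fun v => v) with
  | some m => m
  | none => 0

-- ===== PORT B =====
-- body of "for k in range(1, len(best)): new.append(...)" followed by the conditional
-- growth append; prev carries best[k-1], the [] case is the final append.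
def pvStepAux (c : Int) (prev : Int) : List Int → List Int
  | [] => if 0 ≤ prev + c then [prev + c] else []
  | b :: rest => (if 0 ≤ prev + c then max b (prev + c) else b) :: pvStepAux c b rest

def pvStepB (c : Int) (best : List Int) : List Int :=
  match best with
  | [] => []
  | b :: rest => 0 :: pvStepAux c b rest

def max_card_count_alt (n : Int) (cards : List Int) : Int :=
  ((cards.foldl (fun best c => pvStepB c best) [0]).length : Int) - 1

-- ===== PRECONDITION & SPEC =====
def Spec_max_card_count (n : Int) (cards : List Int) (out : Int) : Prop := out = max_card_count_alt n cards
instance (n : Int) (cards : List Int) (out : Int) : Decidable (Spec_max_card_count n cards out) := by unfold Spec_max_card_count; infer_instance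

-- ===== CLAIM (what is proved, stated in full; the proofs are below) =====
def Claim_equal_max_card_count : Prop := ∀ (n : Int) (cards : List Int), Dom_max_card_count n cards → Spec_max_card_count n cards (max_card_count n cards)

-- ===== LEMMAS AND PROOFS =====

-- The coupling invariant: every dict entry (sum, count) is dominated by best (its count is
-- a valid index and its sum is at most best[count]), and every best[k] is a dict key whose
-- stored count is at least k.
def InvAB (dp : PySem.Dict Int Int) (best : List Int) : Prop :=
  best ≠ [] ∧ best.getD 0 0 = 0 ∧ dp.keys.Nodup ∧
  (∀ x v, dp.get? x = some v → 0 ≤ x ∧ 0 ≤ v ∧ v.toNat < best.length ∧ x ≤ best.getD v.toNat 0) ∧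
  (∀ k : Nat, k < best.length → ∃ cv, dp.get? (best.getD k 0) = some cv ∧ (k : Int) ≤ cv)

theorem lookup_none (k : Int) : ∀ (l : List (Int × Int)), k ∉ l.map Prod.fst → List.lookup k l = none := by
  intro l
  induction l with
  | nil => intro _; rfl
  | cons p rest ih =>
    intro h
    simp only [List.map_cons, List.mem_cons] at h
    push Not at h
    rw [List.lookup, beq_eq_false_iff_ne.mpr h.1]
    exact ih h.2

theorem innerA_skip (c : Int) (nd : PySem.Dict Int Int) (s cnt x : Int)
    (hne' : 0 ≤ s + c → x ≠ s + c) :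
    (pvInnerA c nd (s, cnt)).get? x = nd.get? x := by
  simp only [pvInnerA]
  split
  · rename_i hns
    have hne : x ≠ s + c := hne' hns
    cases h : nd.get? (s + c) with
    | none => exact PySem.Dict.get?_insert_of_ne _ _ hne
    | some v =>
      simp only
      split
      · exact PySem.Dict.get?_insert_of_ne _ _ hne
      · rfl
  · rfl

theorem foldA_get (c x : Int) (l : List (Int × Int)) (hl : (l.map Prod.fst).Nodup) :
    ∀ nd : PySem.Dict Int Int, (l.foldl (pvInnerA c) nd).get? x =
      match (if 0 ≤ x then l.lookup (x - c) else none) with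
      | some cnt => some (match nd.get? x with | none => cnt + 1 | some v => max v (cnt + 1))
      | none => nd.get? x := by
  induction l with
  | nil => intro nd; simp
  | cons p rest ih =>
    obtain ⟨s, cnt⟩ := p
    intro nd
    simp only [List.map_cons, List.nodup_cons] at hl
    obtain ⟨hs, hrest⟩ := hl
    rw [List.foldl_cons, ih hrest]
    by_cases hx : 0 ≤ x
    · by_cases hgen : s = x - c
      · subst hgen
        have hxsum : (x - c) + c = x := by ring
        have hlk : List.lookup (x - c) (((x - c), cnt) :: rest) = some cnt := by
          simp [List.lookup]
        have hrlk : List.lookup (x - c) rest = none := lookup_none _ _ hs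
        rw [if_pos hx, hlk, if_pos hx, hrlk]
        simp only [pvInnerA, hxsum, if_pos hx]
        cases h : nd.get? x with
        | none => simp [PySem.Dict.get?_insert_self]
        | some v =>
          simp only
          by_cases hv : v < cnt + 1
          · simp only [if_pos hv, PySem.Dict.get?_insert_self]
            congr 1
            omega
          · simp only [if_neg hv, h]
            congr 1
            omega
      · have hget : (pvInnerA c nd (s, cnt)).get? x = nd.get? x :=
          innerA_skip c nd s cnt x (fun _ => by omega)
        have hlk : List.lookup (x - c) ((s, cnt) :: rest) = List.lookup (x - c) rest := by
          rw [List.lookup, beq_eq_false_iff_ne.mpr (show x - c ≠ s by omega)]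
        rw [hget, if_pos hx, if_pos hx, hlk]
    · rw [if_neg hx, if_neg hx,
         innerA_skip c nd s cnt x (fun _ => by omega)]

theorem dget_lookup (d : PySem.Dict Int Int) (x : Int) : d.get? x = d.items.lookup x := by
  obtain ⟨l⟩ := d
  induction l with
  | nil => simp [PySem.Dict.get?]
  | cons p rest ih =>
    obtain ⟨k, v⟩ := p
    rw [show ((PySem.Dict.mk ((k,v)::rest)).items : List (Int × Int)) = (k,v)::rest from rfl,
        PySem.Dict.get?_mk_cons, List.lookup]
    rcases eq_or_ne k x with h | h
    · simp [h]
    · have hx : (x == k) = false := beq_eq_false_iff_ne.mpr (Ne.symm h)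
      have hk : (k == x) = false := beq_eq_false_iff_ne.mpr h
      simp [hx, hk, ih]

theorem stepA_get (c : Int) (dp : PySem.Dict Int Int) (hnd : dp.keys.Nodup) (x : Int) :
    (pvStepA c dp).get? x =
      match (if 0 ≤ x then dp.get? (x - c) else none) with
      | some cnt => some (match dp.get? x with | none => cnt + 1 | some v => max v (cnt + 1))
      | none => dp.get? x := by
  have hkeys : (dp.items.map Prod.fst).Nodup := by
    have h : dp.keys = dp.items.map Prod.fst := rfl
    rwa [h] at hnd
  rw [pvStepA, foldA_get c x dp.items hkeys dp, dget_lookup dp (x - c)]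

theorem foldA_nodup (c : Int) (l : List (Int × Int)) :
    ∀ nd : PySem.Dict Int Int, nd.keys.Nodup → (l.foldl (pvInnerA c) nd).keys.Nodup := by
  induction l with
  | nil => intro nd h; exact h
  | cons p rest ih =>
    intro nd h
    rw [List.foldl_cons]
    apply ih
    simp only [pvInnerA]
    split
    · cases hg : nd.get? (p.1 + c) with
      | none => exact PySem.Dict.nodup_keys_insert _ _ _ h
      | some v =>
        simp only
        split
        · exact PySem.Dict.nodup_keys_insert _ _ _ h
        · exact h
    · exact h

theorem stepA_nodup (c : Int) (dp : PySem.Dict Int Int) (hnd : dp.keys.Nodup) :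
    (pvStepA c dp).keys.Nodup := foldA_nodup c dp.items dp hnd

theorem stepA_mono (c : Int) (dp : PySem.Dict Int Int) (hnd : dp.keys.Nodup) (x v : Int)
    (h : dp.get? x = some v) : ∃ v', (pvStepA c dp).get? x = some v' ∧ v ≤ v' := by
  rw [stepA_get c dp hnd x]
  by_cases hx : 0 ≤ x
  · rw [if_pos hx]
    cases hg : dp.get? (x - c) with
    | none => exact ⟨v, h, le_refl v⟩
    | some cnt =>
      rw [h]
      exact ⟨max v (cnt + 1), rfl, le_max_left _ _⟩
  · rw [if_neg hx]
    exact ⟨v, h, le_refl v⟩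

theorem stepAux_length (c : Int) : ∀ (l : List Int) (prev : Int),
    (pvStepAux c prev l).length = l.length + (if 0 ≤ (prev :: l).getD l.length 0 + c then 1 else 0) := by
  intro l
  induction l with
  | nil => intro prev; simp [pvStepAux]; split <;> simp
  | cons b rest ih =>
    intro prev
    simp only [pvStepAux, List.length_cons, List.getD_cons_succ]
    rw [ih b]
    omega

theorem stepAux_getD (c : Int) : ∀ (l : List Int) (prev : Int) (k : Nat), k < l.length →
    (pvStepAux c prev l).getD k 0 =
      if 0 ≤ (prev :: l).getD k 0 + c then max (l.getD k 0) ((prev :: l).getD k 0 + c)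
      else l.getD k 0 := by
  intro l
  induction l with
  | nil => intro prev k hk; simp at hk
  | cons b rest ih =>
    intro prev k hk
    cases k with
    | zero => simp [pvStepAux]
    | succ k =>
      simp only [pvStepAux, List.getD_cons_succ]
      exact ih b k (by simpa using hk)

theorem stepAux_getD_last (c : Int) : ∀ (l : List Int) (prev : Int),
    0 ≤ (prev :: l).getD l.length 0 + c →
    (pvStepAux c prev l).getD l.length 0 = (prev :: l).getD l.length 0 + c := by
  intro l
  induction l with
  | nil => intro prev h; simp at h ⊢; simp [pvStepAux, h]
  | cons b rest ih =>
    intro prev h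
    simp only [List.length_cons, List.getD_cons_succ] at h ⊢
    simp only [pvStepAux, List.getD_cons_succ]
    exact ih b h

theorem inv_step (c : Int) (dp : PySem.Dict Int Int) (best : List Int) (h : InvAB dp best) :
    InvAB (pvStepA c dp) (pvStepB c best) := by
  obtain ⟨hne, h0, hnd, hdom, hrep⟩ := h
  obtain ⟨b, rest, rfl⟩ : ∃ b rest, best = b :: rest := by
    cases best with
    | nil => exact absurd rfl hne
    | cons b rest => exact ⟨b, rest, rfl⟩
  have hb0 : b = 0 := by simpa using h0
  subst hb0
  have hB : pvStepB c ((0:Int) :: rest) = 0 :: pvStepAux c 0 rest := rfl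
  have hlen : (pvStepB c ((0:Int) :: rest)).length
      = (rest.length + 1) + (if 0 ≤ ((0:Int) :: rest).getD rest.length 0 + c then 1 else 0) := by
    rw [hB, List.length_cons, stepAux_length c rest 0]
    omega
  have hg0 : (pvStepB c ((0:Int) :: rest)).getD 0 0 = 0 := by
    rw [hB]; rfl
  have hgk : ∀ j : Nat, j < rest.length →
      (pvStepB c ((0:Int) :: rest)).getD (j+1) 0 =
        if 0 ≤ ((0:Int) :: rest).getD j 0 + c
        then max (rest.getD j 0) (((0:Int) :: rest).getD j 0 + c)
        else rest.getD j 0 := by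
    intro j hj
    rw [hB, List.getD_cons_succ, stepAux_getD c rest 0 j hj]
  have hglast : 0 ≤ ((0:Int) :: rest).getD rest.length 0 + c →
      (pvStepB c ((0:Int) :: rest)).getD (rest.length + 1) 0
        = ((0:Int) :: rest).getD rest.length 0 + c := by
    intro hgrow
    rw [hB, List.getD_cons_succ, stepAux_getD_last c rest 0 hgrow]
  have hmono : ∀ k : Nat, k < rest.length + 1 →
      ((0:Int) :: rest).getD k 0 ≤ (pvStepB c ((0:Int) :: rest)).getD k 0 := by
    intro k hk
    cases k with
    | zero => rw [hg0]; simp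
    | succ j =>
      have hj : j < rest.length := by omega
      rw [hgk j hj, List.getD_cons_succ]
      split
      · exact le_max_left _ _
      · exact le_refl _
  -- taking the generator at index j lands at a key with count at least j+1
  have htake : ∀ j : Nat, j < rest.length + 1 → 0 ≤ ((0:Int) :: rest).getD j 0 + c →
      ∃ cv, (pvStepA c dp).get? (((0:Int) :: rest).getD j 0 + c) = some cv ∧ (j : Int) + 1 ≤ cv := by
    intro j hj hc
    obtain ⟨cvp, hcvp, hcvpge⟩ := hrep j hj
    rw [stepA_get c dp hnd _, if_pos hc]
    have hsub : ((0:Int) :: rest).getD j 0 + c - c = ((0:Int) :: rest).getD j 0 := by ring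
    rw [hsub, hcvp]
    cases hold : dp.get? (((0:Int) :: rest).getD j 0 + c) with
    | none => exact ⟨cvp + 1, rfl, by omega⟩
    | some w =>
      exact ⟨max w (cvp + 1), rfl, le_trans (by omega) (le_max_right _ _)⟩
  have hkeep : ∀ j : Nat, j < rest.length + 1 →
      ∃ cv, (pvStepA c dp).get? (((0:Int) :: rest).getD j 0) = some cv ∧ (j : Int) ≤ cv := by
    intro j hj
    obtain ⟨cvp, hcvp, hcvpge⟩ := hrep j hj
    obtain ⟨cv, hcv, hle⟩ := stepA_mono c dp hnd _ _ hcvp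
    exact ⟨cv, hcv, by omega⟩
  refine ⟨?_, hg0, stepA_nodup c dp hnd, ?_, ?_⟩
  · intro hBempty
    have := congrArg List.length hBempty
    rw [hlen] at this
    simp at this
  · -- domination of every entry of the new dict
    intro x v hx
    have holdcase : ∀ w, dp.get? x = some w → v = w →
        0 ≤ x ∧ 0 ≤ v ∧ v.toNat < (pvStepB c ((0:Int) :: rest)).length
          ∧ x ≤ (pvStepB c ((0:Int) :: rest)).getD v.toNat 0 := by
      intro w hw hvw
      subst hvw
      obtain ⟨hx0, hw0, hwlt, hwle⟩ := hdom _ _ hw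
      simp only [List.length_cons] at hwlt
      refine ⟨hx0, hw0, by rw [hlen]; split <;> omega, le_trans hwle (hmono _ (by omega))⟩
    have hgencase : ∀ cnt, dp.get? (x - c) = some cnt → 0 ≤ x → v = cnt + 1 →
        0 ≤ x ∧ 0 ≤ v ∧ v.toNat < (pvStepB c ((0:Int) :: rest)).length
          ∧ x ≤ (pvStepB c ((0:Int) :: rest)).getD v.toNat 0 := by
      intro cnt hg hx0 hv
      obtain ⟨_, hcnt0, hcntlt, hcntle⟩ := hdom _ _ hg
      simp only [List.length_cons] at hcntlt
      have hvt : v.toNat = cnt.toNat + 1 := by omega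
      have hbc : 0 ≤ ((0:Int) :: rest).getD cnt.toNat 0 + c := by omega
      have hxb : x ≤ ((0:Int) :: rest).getD cnt.toNat 0 + c := by omega
      by_cases hin : cnt.toNat < rest.length
      · -- inner position cnt.toNat + 1
        refine ⟨hx0, by omega, ?_, ?_⟩
        · rw [hlen, hvt]; split <;> omega
        · rw [hvt, hgk cnt.toNat hin, if_pos hbc]
          exact le_trans hxb (le_max_right _ _)
      · -- growth position: cnt.toNat = rest.length
        have hteq : cnt.toNat = rest.length := by omega
        rw [hteq] at hbc hxb
        refine ⟨hx0, by omega, ?_, ?_⟩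
        · rw [hlen, hvt, hteq, if_pos hbc]; omega
        · rw [hvt, hteq, hglast hbc]
          exact hxb
    rw [stepA_get c dp hnd x] at hx
    by_cases hxpos : 0 ≤ x
    · rw [if_pos hxpos] at hx
      cases hg : dp.get? (x - c) with
      | none =>
        rw [hg] at hx
        exact holdcase v hx rfl
      | some cnt =>
        rw [hg] at hx
        cases hold : dp.get? x with
        | none =>
          rw [hold] at hx
          simp only [Option.some.injEq] at hx
          exact hgencase cnt hg hxpos hx.symm
        | some w =>
          rw [hold] at hx
          simp only [Option.some.injEq] at hx
          by_cases hwc : cnt + 1 ≤ w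
          · exact holdcase w hold (by omega)
          · exact hgencase cnt hg hxpos (by omega)
    · rw [if_neg hxpos] at hx
      exact holdcase v hx rfl
  · -- every new best[k] is represented in the new dict
    intro k hk
    rw [hlen] at hk
    by_cases hkm : k < rest.length + 1
    · cases k with
      | zero =>
        rw [hg0]
        have h00 : ((0:Int) :: rest).getD 0 0 = 0 := rfl
        obtain ⟨cv, hcv, hge⟩ := hkeep 0 (by omega)
        rw [h00] at hcv
        exact ⟨cv, hcv, by omega⟩
      | succ j =>
        have hj : j < rest.length := by omega
        rw [hgk j hj]
        by_cases hc : 0 ≤ ((0:Int) :: rest).getD j 0 + c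
        · rw [if_pos hc]
          by_cases hmx : ((0:Int) :: rest).getD j 0 + c ≤ rest.getD j 0
          · rw [max_eq_left hmx]
            obtain ⟨cv, hcv, hge⟩ := hkeep (j+1) (by omega)
            rw [List.getD_cons_succ] at hcv
            exact ⟨cv, hcv, by exact_mod_cast hge⟩
          · rw [max_eq_right (by omega)]
            obtain ⟨cv, hcv, hge⟩ := htake j (by omega) hc
            exact ⟨cv, hcv, by push_cast; omega⟩
        · rw [if_neg hc]
          obtain ⟨cv, hcv, hge⟩ := hkeep (j+1) (by omega)
          rw [List.getD_cons_succ] at hcv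
          exact ⟨cv, hcv, by exact_mod_cast hge⟩
    · -- the growth position
      have hgrow : 0 ≤ ((0:Int) :: rest).getD rest.length 0 + c := by
        by_contra hng
        rw [if_neg hng] at hk
        omega
      have hkeq : k = rest.length + 1 := by
        rw [if_pos hgrow] at hk
        omega
      subst hkeq
      rw [hglast hgrow]
      obtain ⟨cv, hcv, hge⟩ := htake rest.length (by omega) hgrow
      exact ⟨cv, hcv, by push_cast; omega⟩

theorem inv_fold (cards : List Int) : ∀ (dp : PySem.Dict Int Int) (best : List Int), InvAB dp best →
    InvAB (cards.foldl (fun dp c => pvStepA c dp) dp) (cards.foldl (fun best c => pvStepB c best) best) := by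
  induction cards with
  | nil => intro dp best h; exact h
  | cons c rest ih => intro dp best h; exact ih _ _ (inv_step c dp best h)

theorem inv_init : InvAB (PySem.Dict.ofList [((0:Int),(0:Int))]) [0] := by
  refine ⟨by simp, rfl, ?_, ?_, ?_⟩
  · exact PySem.Dict.nodup_keys_ofList _
  · intro x v hx
    rw [dget_lookup] at hx
    have hitems : (PySem.Dict.ofList [((0:Int),(0:Int))]).items = [((0:Int),(0:Int))] := rfl
    rw [hitems] at hx
    by_cases h : x = 0
    · subst h
      simp [List.lookup] at hx
      subst hx
      refine ⟨le_refl _, le_refl _, by simp, by simp⟩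
    · rw [List.lookup, beq_eq_false_iff_ne.mpr (show x ≠ 0 from h)] at hx
      simp at hx
  · intro k hk
    have hk0 : k = 0 := by simpa using hk
    subst hk0
    exact ⟨0, rfl, le_refl _⟩

theorem inv_extract (dp : PySem.Dict Int Int) (best : List Int) (h : InvAB dp best) :
    (match PySem.List.max? dp.values (fun v => v) with
     | some m => m
     | none => 0) = (best.length : Int) - 1 := by
  obtain ⟨hne, h0, hnd, hdom, hrep⟩ := h
  have hm : 0 < best.length := List.length_pos_iff.mpr hne
  obtain ⟨cv, hcv, hcvge⟩ := hrep (best.length - 1) (by omega)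
  have hcvle : cv ≤ (best.length : Int) - 1 := by
    obtain ⟨_, hv0, hvlt, _⟩ := hdom _ _ hcv
    omega
  have hcveq : cv = (best.length : Int) - 1 := by omega
  have hcvmem : cv ∈ dp.values := by
    have hmem := PySem.Dict.mem_items_of_get?_eq_some _ hcv
    have hv : dp.values = dp.items.map Prod.snd := rfl
    rw [hv]
    exact List.mem_map_of_mem hmem
  have hvbound : ∀ w ∈ dp.values, w ≤ (best.length : Int) - 1 := by
    intro w hw
    have hv : dp.values = dp.items.map Prod.snd := rfl
    rw [hv, List.mem_map] at hw
    obtain ⟨p, hp, hpw⟩ := hw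
    obtain ⟨pk, pv⟩ := p
    have hg : dp.get? pk = some pv := PySem.Dict.get?_of_mem_items _ hp hnd
    obtain ⟨_, hw0, hwlt, _⟩ := hdom _ _ hg
    omega
  cases hmax : PySem.List.max? dp.values (fun v => v) with
  | none =>
    rw [PySem.List.max?_eq_none_iff] at hmax
    rw [hmax] at hcvmem
    simp at hcvmem
  | some M =>
    have hMmem : M ∈ dp.values := PySem.List.max?_mem hmax
    have hMle : M ≤ (best.length : Int) - 1 := hvbound M hMmem
    have hMge : cv ≤ M := PySem.List.max?_isMax hmax cv hcvmem
    show M = (best.length : Int) - 1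
    omega

-- ===== VERDICT (by name: the statement is the Claim_ definition above) =====
theorem max_card_count_spec : Claim_equal_max_card_count := by
  intro n cards _
  unfold Spec_max_card_count max_card_count max_card_count_alt
  exact inv_extract _ _ (inv_fold cards _ _ inv_init)
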